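-- pv_equiv track=rewrite | github.com/TheOtherBrian1/Is_NSFW_Reddit_Bot | Is_Account_Nsfw/format_markdown_body.py | post_or_comment
-- ===== SOURCE A (Python) =====
-- def post_or_comment(nsfw_sub_list):
-- 	posts = []
-- 	comments = []
-- 	for engagement in nsfw_sub_list:
-- 		if engagement[0]:
-- 			index = len(posts)
-- 			posts.append(f'[{index}]({engagement[1]})')
-- 		else:
-- 			index = len(comments)
-- 			comments.append(f'[{index}]({engagement[1]})')
--
-- 	return [", ".join(posts), ", ".join(comments)]
-- ===== SOURCE B (Python) =====
-- def post_or_comment(nsfw_sub_list):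
-- 	posts_urls = [engagement[1] for engagement in nsfw_sub_list if engagement[0]]
-- 	comments_urls = [engagement[1] for engagement in nsfw_sub_list if not engagement[0]]
-- 	return [
-- 		", ".join(f'[{i}]({url})' for i, url in enumerate(posts_urls)),
-- 		", ".join(f'[{i}]({url})' for i, url in enumerate(comments_urls)),
-- 	]
-- ===== Notes on version B (the rewrite author's own statement) =====
-- stated objective: simpler
-- what changed: Replaces the single interleaved partition-and-format loop with manual len()-as-index counters by a partition phase (two comprehensions collecting raw urls) followed by an enumerate-based formatting-and-join phase.
import Mathlib
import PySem

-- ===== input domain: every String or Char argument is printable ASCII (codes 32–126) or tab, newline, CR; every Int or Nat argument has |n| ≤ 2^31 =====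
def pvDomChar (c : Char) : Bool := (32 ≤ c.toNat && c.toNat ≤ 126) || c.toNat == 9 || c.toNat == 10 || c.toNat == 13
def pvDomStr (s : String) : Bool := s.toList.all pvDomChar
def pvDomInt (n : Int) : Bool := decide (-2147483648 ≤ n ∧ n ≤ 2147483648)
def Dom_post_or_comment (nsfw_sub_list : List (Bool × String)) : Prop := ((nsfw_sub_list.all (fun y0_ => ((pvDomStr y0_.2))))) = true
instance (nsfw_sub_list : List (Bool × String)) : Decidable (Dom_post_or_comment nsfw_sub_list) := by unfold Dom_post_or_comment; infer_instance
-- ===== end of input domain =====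

-- B splits A's interleaved partition-and-format loop (manual len()-as-index counters) into a
-- partition pass collecting raw urls followed by an enumerate-based formatting pass: same output.


-- f'[{index}]({url})' (shared f-string formatting, identical in both Pythons)
def pcFmt (index : Int) (url : String) : String :=
  PySem.Str.join "" ["[", PySem.Int.toStr index, "](", url, ")"]

-- ===== PORT A =====
-- one loop body iteration: append to posts or comments with index = current length
def pcStep (pc : List String × List String) (engagement : Bool × String) : List String × List String :=
  if engagement.1 then
    (pc.1 ++ [pcFmt (Int.ofNat pc.1.length) engagement.2], pc.2)
  else
    (pc.1, pc.2 ++ [pcFmt (Int.ofNat pc.2.length) engagement.2])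

def post_or_comment (nsfw_sub_list : List (Bool × String)) : List String :=
  let pc := nsfw_sub_list.foldl pcStep ([], [])
  [PySem.Str.join ", " pc.1, PySem.Str.join ", " pc.2]

-- ===== PORT B =====
def post_or_comment_alt (nsfw_sub_list : List (Bool × String)) : List String :=
  let posts_urls := (nsfw_sub_list.filter (fun engagement => engagement.1)).map (fun engagement => engagement.2)
  let comments_urls := (nsfw_sub_list.filter (fun engagement => !engagement.1)).map (fun engagement => engagement.2)
  [ PySem.Str.join ", " ((PySem.List.enumerate posts_urls 0).map (fun p => pcFmt p.1 p.2)),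
    PySem.Str.join ", " ((PySem.List.enumerate comments_urls 0).map (fun p => pcFmt p.1 p.2)) ]

-- ===== PRECONDITION & SPEC =====
def Spec_post_or_comment (nsfw_sub_list : List (Bool × String)) (out : List String) : Prop := out = post_or_comment_alt nsfw_sub_list
instance (nsfw_sub_list : List (Bool × String)) (out : List String) : Decidable (Spec_post_or_comment nsfw_sub_list out) := by unfold Spec_post_or_comment; infer_instance

-- ===== CLAIM (what is proved, stated in full; the proofs are below) =====
def Claim_equal_post_or_comment : Prop := ∀ (nsfw_sub_list : List (Bool × String)), Dom_post_or_comment nsfw_sub_list → Spec_post_or_comment nsfw_sub_list (post_or_comment nsfw_sub_list)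

-- ===== LEMMAS AND PROOFS =====

-- loop invariant: folding A's step from accumulators (p, c) appends the enumerate-formatted
-- partitioned urls, starting the indices at the current lengths.
theorem pcStep_foldl (l : List (Bool × String)) :
    ∀ (p c : List String),
      l.foldl pcStep (p, c) =
        (p ++ (PySem.List.enumerate ((l.filter (fun e => e.1)).map (fun e => e.2)) (Int.ofNat p.length)).map (fun q => pcFmt q.1 q.2),
         c ++ (PySem.List.enumerate ((l.filter (fun e => !e.1)).map (fun e => e.2)) (Int.ofNat c.length)).map (fun q => pcFmt q.1 q.2)) := by
  induction l with
  | nil => intro p c; simp [PySem.List.enumerate_nil]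
  | cons e rest ih =>
    intro p c
    by_cases he : e.1 = true
    · have : pcStep (p, c) e = (p ++ [pcFmt (Int.ofNat p.length) e.2], c) := by
        simp [pcStep, he]
      simp only [List.foldl_cons, this, ih]
      simp only [Prod.mk.injEq]
      refine ⟨?_, by simp [he]⟩
      simp [he, PySem.List.enumerate_cons]
    · have hb : e.1 = false := by simpa using he
      have : pcStep (p, c) e = (p, c ++ [pcFmt (Int.ofNat c.length) e.2]) := by
        simp [pcStep, hb]
      simp only [List.foldl_cons, this, ih]
      simp only [Prod.mk.injEq]
      refine ⟨by simp [hb], ?_⟩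
      simp [hb, PySem.List.enumerate_cons]

-- ===== VERDICT (by name: the statement is the Claim_ definition above) =====
theorem post_or_comment_spec : Claim_equal_post_or_comment := by
  intro l _
  unfold Spec_post_or_comment post_or_comment post_or_comment_alt
  simp [pcStep_foldl l [] []]
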